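-- pv_equiv track=rewrite | github.com/joas77/AdventOfCode | events/2015/day8/day8_part2.py | count_chars_encoded
-- ===== SOURCE A (Python) =====
-- def count_chars_encoded(line):
--     count = 0
--     for c in line:
--         if c == '"':
--             count += 1
--         elif c == '\\':
--             count += 1
--         count += 1
--
--     count += 2 # for the quotes
--     return count
-- ===== SOURCE B (Python) =====
-- def count_chars_encoded(line):
--     # Build the encoded literal's body by actually escaping it, then measure it.
--     # The two wrapping quotes add 2.
--     body = line.replace('\\', '\\\\').replace('"', '\\"')
--     return len(body) + 2
-- ===== Notes on version B (the rewrite author's own statement) =====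
-- stated objective: faster
-- what changed: Instead of a per-character Python accumulator loop, B actually performs the encoding: it builds the escaped body with two str.replace passes (backslash->double backslash, quote->backslash-quote) and returns that string's length plus 2 for the wrapping quotes; the replace passes run in C, giving a large constant-factor speedup.
import Mathlib
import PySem

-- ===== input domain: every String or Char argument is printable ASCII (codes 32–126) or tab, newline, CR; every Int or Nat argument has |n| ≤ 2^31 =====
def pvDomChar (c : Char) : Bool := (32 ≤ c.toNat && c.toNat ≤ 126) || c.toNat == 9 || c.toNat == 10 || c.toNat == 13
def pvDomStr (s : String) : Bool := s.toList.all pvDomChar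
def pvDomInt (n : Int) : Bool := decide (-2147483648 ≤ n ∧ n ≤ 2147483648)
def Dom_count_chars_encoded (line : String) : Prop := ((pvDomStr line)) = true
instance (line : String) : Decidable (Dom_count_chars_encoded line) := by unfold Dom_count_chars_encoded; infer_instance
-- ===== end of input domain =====

-- B builds the encoded literal's body via two escaping replace passes and measures its length, instead of A's per-character accumulator loop (alternative algorithm).


-- ===== PORT A =====
def count_chars_encoded (line : String) : Int :=
  (line.toList.foldl
    (fun count c =>
      (if c == '"' then count + 1
       else if c == '\\' then count + 1
       else count) + 1)
    (0 : Int)) + 2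

-- ===== PORT B =====
-- body = line.replace('\\','\\\\').replace('"','\\"'); return len(body) + 2
def count_chars_encoded_alt (line : String) : Int :=
  PySem.Str.len (PySem.Str.replace (PySem.Str.replace line "\\" "\\\\") "\"" "\\\"") + 2

-- ===== PRECONDITION & SPEC =====
def Spec_count_chars_encoded (line : String) (out : Int) : Prop := out = count_chars_encoded_alt line
instance (line : String) (out : Int) : Decidable (Spec_count_chars_encoded line out) := by unfold Spec_count_chars_encoded; infer_instance

-- ===== CLAIM (what is proved, stated in full; the proofs are below) =====
def Claim_equal_count_chars_encoded : Prop := ∀ (line : String), Dom_count_chars_encoded line → Spec_count_chars_encoded line (count_chars_encoded line)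

-- ===== LEMMAS AND PROOFS =====

-- replace with a single-character pattern is a flatMap substitution
theorem replace_go_single (o : Char) (nw : List Char) :
    ∀ (fuel : Nat) (l acc : List Char), l.length ≤ fuel →
      PySem.Chars.replace.go [o] nw fuel l acc
        = acc.reverse ++ l.flatMap (fun c => if c = o then nw else [c]) := by
  intro fuel
  induction fuel with
  | zero =>
    intro l acc h
    have : l = [] := List.length_eq_zero_iff.mp (Nat.le_zero.mp h)
    subst this
    simp [PySem.Chars.replace.go]
  | succ n ih =>
    intro l acc h
    cases l with
    | nil => simp [PySem.Chars.replace.go]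
    | cons c t =>
      simp only [PySem.Chars.replace.go, List.isPrefixOf, List.flatMap_cons]
      by_cases hc : o = c
      · subst hc
        simp only [beq_self_eq_true, Bool.true_and, if_true,
          List.length_singleton, List.drop_one, List.tail_cons]
        rw [ih t _ (by simpa using Nat.le_of_succ_le_succ h)]
        simp
      · have hb : (o == c) = false := by simpa using hc
        rw [if_neg (by simp [hb]), ih t _ (by simpa using Nat.le_of_succ_le_succ h)]
        rw [if_neg (fun h' : c = o => hc h'.symm)]; simp

theorem replace_single (o : Char) (nw : List Char) (l : List Char) :
    PySem.Chars.replace l [o] nw = l.flatMap (fun c => if c = o then nw else [c]) := by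
  unfold PySem.Chars.replace
  rw [if_neg (by simp), replace_go_single o nw l.length l [] (le_refl _)]
  simp

-- length of the doubly-escaped body = length + number of quotes/backslashes
theorem escaped_length (l : List Char) :
    ((l.flatMap (fun c => if c = '\\' then ['\\', '\\'] else [c])).flatMap
        (fun c => if c = '"' then ['\\', '"'] else [c])).length
      = l.length + l.countP (fun c => c == '"' || c == '\\') := by
  induction l with
  | nil => simp
  | cons c t ih =>
    simp only [List.flatMap_cons, List.flatMap_append, List.length_append,
      List.countP_cons, List.length_cons]
    by_cases h1 : c = '"' <;> by_cases h2 : c = '\\' <;>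
      simp [h1, h2, ih] <;> omega

-- A's fold in closed form
theorem cce_foldl (l : List Char) (a : Int) :
    l.foldl
      (fun count c =>
        (if c == '"' then count + 1
         else if c == '\\' then count + 1
         else count) + 1) a
    = a + l.length + (l.countP (fun c => c == '"' || c == '\\') : Int) := by
  induction l generalizing a with
  | nil => simp
  | cons c cs ih =>
    simp only [List.foldl_cons, ih, List.countP_cons, List.length_cons]
    by_cases h1 : c = '"' <;> by_cases h2 : c = '\\' <;>
      simp [h1, h2] <;> ring

-- ===== VERDICT (by name: the statement is the Claim_ definition above) =====
theorem count_chars_encoded_spec : Claim_equal_count_chars_encoded := by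
  intro line _
  unfold Spec_count_chars_encoded count_chars_encoded count_chars_encoded_alt
  rw [cce_foldl]
  have hb : PySem.Str.len (PySem.Str.replace (PySem.Str.replace line "\\" "\\\\") "\"" "\\\"")
      = ((line.toList.length : Int) + (line.toList.countP (fun c => c == '"' || c == '\\') : Int)) := by
    rw [PySem.Str.len_eq, PySem.Str.toList_replace, PySem.Str.toList_replace]
    have h1 : ("\\" : String).toList = ['\\'] := by decide
    have h2 : ("\\\\" : String).toList = ['\\', '\\'] := by decide
    have h3 : ("\"" : String).toList = ['"'] := by decide
    have h4 : ("\\\"" : String).toList = ['\\', '"'] := by decide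
    rw [h1, h2, h3, h4, replace_single, replace_single, escaped_length]
    push_cast
    ring
  rw [hb]
  ring
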